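-- pv_equiv track=rewrite | github.com/Cantalapiedra/barleymapcore | maps/mappers/Mappers.py | _get_unmapped_markers
-- ===== SOURCE A (Python) =====
-- def _get_unmapped_markers(markers_positions):
--     positions_list = []
--
--     for marker_id in markers_positions:
--         hits_no_pos = markers_positions[marker_id]["hits_no_position"]
--         num_contig_no_pos = len(hits_no_pos)
--
--         if num_contig_no_pos == 0: continue # if has all the contigs with map position, continue
--
--         # This is to point out if the marker has other alignments which YES have map position
--         num_marker_pos = len(markers_positions[marker_id]["positions"])
--
--         for contig in hits_no_pos:
--             # marker contig has_other_contigs_with_map_position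
--             positions_list.append([marker_id, contig, num_marker_pos > 0])
--
--     positions_list = sorted(positions_list, key=lambda sorting: (sorting[0], sorting[1], sorting[2]))
--
--     return positions_list
-- ===== SOURCE B (Python) =====
-- def _get_unmapped_markers(markers_positions):
--     # Different decomposition: recursively consume the items pre-sorted by marker id,
--     # emitting each marker's contigs already sorted, so no global row sort is needed
--     # (the bool is determined by the marker, so ties sort identically).
--     def build(items):
--         if not items:
--             return []
--         (marker_id, entry), rest = items[0], items[1:]
--         hits_no_pos = entry["hits_no_position"]
--         if not hits_no_pos:
--             return build(rest)
--         flag = len(entry["positions"]) > 0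
--         return [[marker_id, c, flag] for c in sorted(hits_no_pos)] + build(rest)
--     return build(sorted(markers_positions.items(), key=lambda it: it[0]))
-- ===== Notes on version B (the rewrite author's own statement) =====
-- stated objective: alternative
-- what changed: B recursively consumes the dict items pre-sorted by marker id and emits each marker's contigs sorted, producing rows already in final order with no dict lookups and no global row sort, instead of A's collect-all-rows-then-sort loop; Pre_ excludes inputs where A raises KeyError on a missing 'hits_no_position'/'positions' key and association lists with duplicate marker keys, which do not represent a Python dict argument.
import Mathlib
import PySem

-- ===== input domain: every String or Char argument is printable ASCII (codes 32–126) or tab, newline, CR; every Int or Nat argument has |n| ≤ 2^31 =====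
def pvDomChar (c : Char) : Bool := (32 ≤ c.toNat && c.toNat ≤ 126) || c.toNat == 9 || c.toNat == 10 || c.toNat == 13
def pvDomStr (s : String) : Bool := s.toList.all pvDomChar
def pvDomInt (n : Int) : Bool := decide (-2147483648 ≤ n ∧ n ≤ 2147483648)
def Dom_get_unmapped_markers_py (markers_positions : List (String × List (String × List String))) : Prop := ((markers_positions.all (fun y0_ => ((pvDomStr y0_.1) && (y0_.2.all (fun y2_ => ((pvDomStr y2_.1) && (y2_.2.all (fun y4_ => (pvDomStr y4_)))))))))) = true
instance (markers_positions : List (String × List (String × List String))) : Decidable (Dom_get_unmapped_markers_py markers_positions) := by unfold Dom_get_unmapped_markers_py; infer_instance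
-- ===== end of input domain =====

-- B recursively consumes the items pre-sorted by marker id, emitting each marker's contigs
-- already sorted, so rows come out in final order with no dict lookups and no global row sort
-- (the row's Bool is determined by the marker, so the orders coincide). Same asymptotic cost.

-- Python's sort key (marker_id, contig, bool) as a lexicographic key into a linearly ordered type.
def pvKey (r : String × String × Bool) : Lex (String × Lex (String × Bool)) :=
  toLex (r.1, toLex (r.2.1, r.2.2))

-- ===== PORT A =====
def get_unmapped_markers_py (markers_positions : List (String × List (String × List String))) : List (String × String × Bool) :=
  -- for marker_id in markers_positions: … (dict key lookups are first-match; KeyError cases excluded by Pre_)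
  let positions_list := markers_positions.foldl (fun acc kv =>
    match (PySem.Dict.mk markers_positions).get? kv.1 with
    | none => acc
    | some entry =>
      match (PySem.Dict.mk entry).get? "hits_no_position" with
      | none => acc   -- Python raises KeyError here; excluded by Pre_
      | some hits_no_pos =>
        if hits_no_pos.length = 0 then acc   -- continue
        else
          match (PySem.Dict.mk entry).get? "positions" with
          | none => acc   -- Python raises KeyError here; excluded by Pre_
          | some poss =>
            acc ++ hits_no_pos.map (fun contig => (kv.1, contig, decide (poss.length > 0)))) []
  PySem.List.sorted positions_list pvKey

-- ===== PORT B =====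
-- helper: one marker's rows — '[[marker_id, c, flag] for c in sorted(hits_no_pos)]' with the guards
def pvEmit (item : String × List (String × List String)) : List (String × String × Bool) :=
  match (PySem.Dict.mk item.2).get? "hits_no_position" with
  | none => []   -- Python raises KeyError here; excluded by Pre_
  | some hits_no_pos =>
    if hits_no_pos = [] then []
    else
      match (PySem.Dict.mk item.2).get? "positions" with
      | none => []   -- Python raises KeyError here; excluded by Pre_
      | some poss =>
        (PySem.List.sorted hits_no_pos (fun c => c)).map
          (fun c => (item.1, c, decide (poss.length > 0)))

-- helper: 'def build(items)' — structural recursion down the sorted item list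
def pvBuild : List (String × List (String × List String)) → List (String × String × Bool)
  | [] => []
  | item :: rest => pvEmit item ++ pvBuild rest

def get_unmapped_markers_py_alt (markers_positions : List (String × List (String × List String))) : List (String × String × Bool) :=
  pvBuild (PySem.List.sorted markers_positions (fun it => it.1))

-- ===== PRECONDITION & SPEC =====
-- Pre_ excludes (a) inputs where Python A raises KeyError ("hits_no_position" missing, or
-- "positions" missing while hits_no_position is non-empty), and (b) association lists with
-- duplicate marker keys, which do not represent a Python dict (a real dict argument never has
-- duplicate keys, so no input A returns on is lost by (b)).
def Pre_get_unmapped_markers_py (markers_positions : List (String × List (String × List String))) : Prop :=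
  (markers_positions.map Prod.fst).Nodup ∧
  ∀ p ∈ markers_positions,
    ((PySem.Dict.mk p.2).get? "hits_no_position").isSome = true ∧
    (((PySem.Dict.mk p.2).get? "hits_no_position").getD [] ≠ [] →
      ((PySem.Dict.mk p.2).get? "positions").isSome = true)
instance (markers_positions : List (String × List (String × List String))) : Decidable (Pre_get_unmapped_markers_py markers_positions) := by unfold Pre_get_unmapped_markers_py; infer_instance

def pvWitness_get_unmapped_markers_py : (List (String × List (String × List String))) :=
  [("m2", [("hits_no_position", ["c2", "c1"]), ("positions", ["p1"])]),
   ("m1", [("hits_no_position", []), ("positions", [])])]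

def Spec_get_unmapped_markers_py (markers_positions : List (String × List (String × List String))) (out : List (String × String × Bool)) : Prop := out = get_unmapped_markers_py_alt markers_positions
instance (markers_positions : List (String × List (String × List String))) (out : List (String × String × Bool)) : Decidable (Spec_get_unmapped_markers_py markers_positions out) := by unfold Spec_get_unmapped_markers_py; infer_instance

-- ===== CLAIM (what is proved, stated in full; the proofs are below) =====
def Claim_equal_get_unmapped_markers_py : Prop := ∀ (markers_positions : List (String × List (String × List String))), Dom_get_unmapped_markers_py markers_positions → Pre_get_unmapped_markers_py markers_positions → Spec_get_unmapped_markers_py markers_positions (get_unmapped_markers_py markers_positions)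

-- ===== LEMMAS AND PROOFS =====

-- A's per-item rows (contigs in input order), with A's lookup of the item's key in the whole dict.
def pvRowsA (mp : List (String × List (String × List String)))
    (kv : String × List (String × List String)) : List (String × String × Bool) :=
  match (PySem.Dict.mk mp).get? kv.1 with
  | none => []
  | some entry =>
    match (PySem.Dict.mk entry).get? "hits_no_position" with
    | none => []
    | some hits_no_pos =>
      if hits_no_pos.length = 0 then []
      else
        match (PySem.Dict.mk entry).get? "positions" with
        | none => []
        | some poss => hits_no_pos.map (fun contig => (kv.1, contig, decide (poss.length > 0)))

theorem pvKey_injective : Function.Injective pvKey := by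
  rintro ⟨a1, a2, a3⟩ ⟨b1, b2, b3⟩ h
  simp only [pvKey, toLex_inj, Prod.mk.injEq] at h
  obtain ⟨h1, h2, h3⟩ := h
  simp [h1, h2, h3]

theorem pvKey_le_of_snd_le (m c c' : String) (b : Bool) (h : c ≤ c') :
    pvKey (m, c, b) ≤ pvKey (m, c', b) := by
  apply Prod.Lex.le_iff.mpr
  right
  refine ⟨rfl, Prod.Lex.le_iff.mpr ?_⟩
  rcases lt_or_eq_of_le h with h' | h'
  · exact Or.inl h'
  · exact Or.inr ⟨h', le_refl _⟩

theorem pvKey_le_of_fst_lt (r r' : String × String × Bool) (h : r.1 < r'.1) :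
    pvKey r ≤ pvKey r' := by
  apply Prod.Lex.le_iff.mpr
  exact Or.inl h

-- first-match dict lookup of a key of the list, under Nodup keys
theorem pvGet?_mk_of_nodup (mp : List (String × List (String × List String)))
    (hnd : (mp.map Prod.fst).Nodup) (kv : String × List (String × List String))
    (hmem : kv ∈ mp) : (PySem.Dict.mk mp).get? kv.1 = some kv.2 := by
  induction mp with
  | nil => simp at hmem
  | cons hd tl ih =>
    rcases List.mem_cons.mp hmem with h | h
    · subst h
      obtain ⟨k, v⟩ := kv
      rw [PySem.Dict.get?_mk_cons]
      simp
    · have hne : hd.1 ≠ kv.1 := by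
        intro he
        exact (List.nodup_cons.mp (by simpa using hnd)).1
          (List.mem_map.mpr ⟨kv, h, he.symm⟩)
      rw [PySem.Dict.get?_mk_cons]
      simp only [beq_iff_eq, if_neg hne]
      exact ih (List.nodup_cons.mp (by simpa using hnd)).2 h

theorem pvRowsA_eq_foldl (mp : List (String × List (String × List String))) :
    get_unmapped_markers_py mp
      = PySem.List.sorted (mp.flatMap (pvRowsA mp)) pvKey := by
  have hbody : (fun (acc : List (String × String × Bool)) (kv : String × List (String × List String)) =>
      match (PySem.Dict.mk mp).get? kv.1 with
      | none => acc
      | some entry =>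
        match (PySem.Dict.mk entry).get? "hits_no_position" with
        | none => acc
        | some hits_no_pos =>
          if hits_no_pos.length = 0 then acc
          else
            match (PySem.Dict.mk entry).get? "positions" with
            | none => acc
            | some poss =>
              acc ++ hits_no_pos.map (fun contig => (kv.1, contig, decide (poss.length > 0))))
      = (fun acc kv => acc ++ pvRowsA mp kv) := by
    funext acc kv
    simp only [pvRowsA]
    rcases h1 : (PySem.Dict.mk mp).get? kv.1 with _ | entry <;> simp only [h1]
    · simp
    rcases h2 : (PySem.Dict.mk entry).get? "hits_no_position" with _ | hits
    · simp
    by_cases h : hits.length = 0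
    · simp [h]
    rcases h3 : (PySem.Dict.mk entry).get? "positions" with _ | poss <;> simp only [h3]
    · simp [h]
    · simp [h]
  show PySem.List.sorted (mp.foldl _ []) pvKey = _
  rw [hbody, PySem.List.foldl_append_eq_flatMap, List.nil_append]

theorem pvBuild_eq_flatMap (l : List (String × List (String × List String))) :
    pvBuild l = l.flatMap pvEmit := by
  induction l with
  | nil => rfl
  | cons hd tl ih => simp [pvBuild, ih]

theorem pvEmit_perm (mp : List (String × List (String × List String)))
    (hnd : (mp.map Prod.fst).Nodup) (kv : String × List (String × List String))
    (hmem : kv ∈ mp) : (pvEmit kv).Perm (pvRowsA mp kv) := by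
  simp only [pvEmit, pvRowsA, pvGet?_mk_of_nodup mp hnd kv hmem]
  rcases h2 : (PySem.Dict.mk kv.2).get? "hits_no_position" with _ | hits <;> simp only [h2]
  · exact List.Perm.refl _
  by_cases h : hits = []
  · simp [h]
  · have hlen : ¬ hits.length = 0 := by simpa [List.length_eq_zero_iff] using h
    simp only [if_neg h, if_neg hlen]
    rcases h3 : (PySem.Dict.mk kv.2).get? "positions" with _ | poss <;> simp only [h3]
    · exact List.Perm.refl _
    · exact (PySem.List.sorted_perm hits (fun c => c) false).map _

theorem pvEmit_fst (kv : String × List (String × List String)) :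
    ∀ r ∈ pvEmit kv, r.1 = kv.1 := by
  intro r hr
  simp only [pvEmit] at hr
  rcases h2 : (PySem.Dict.mk kv.2).get? "hits_no_position" with _ | hits <;> simp only [h2] at hr
  · simp at hr
  by_cases h : hits = []
  · simp [h] at hr
  simp only [if_neg h] at hr
  rcases h3 : (PySem.Dict.mk kv.2).get? "positions" with _ | poss <;> simp only [h3] at hr
  · simp at hr
  · obtain ⟨c, _, rfl⟩ := List.mem_map.mp hr
    rfl

theorem pvEmit_pairwise (kv : String × List (String × List String)) :
    (pvEmit kv).Pairwise (fun a b => pvKey a ≤ pvKey b) := by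
  simp only [pvEmit]
  rcases h2 : (PySem.Dict.mk kv.2).get? "hits_no_position" with _ | hits
  · exact List.Pairwise.nil
  by_cases h : hits = []
  · simp [h]
  simp only [if_neg h]
  rcases h3 : (PySem.Dict.mk kv.2).get? "positions" with _ | poss <;> simp only [h3]
  · exact List.Pairwise.nil
  · refine List.pairwise_map.mpr ?_
    exact (PySem.List.sorted_pairwise hits (fun c => c)).imp
      (fun hle => pvKey_le_of_snd_le _ _ _ _ hle)

-- ===== VERDICT (by name: the statement is the Claim_ definition above) =====
theorem get_unmapped_markers_py_spec : Claim_equal_get_unmapped_markers_py := by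
  intro mp _hdom hpre
  show get_unmapped_markers_py mp = get_unmapped_markers_py_alt mp
  rw [pvRowsA_eq_foldl]
  show _ = pvBuild (PySem.List.sorted mp (fun it => it.1))
  rw [pvBuild_eq_flatMap]
  have hsp : (PySem.List.sorted mp (fun it => it.1)).Perm mp :=
    PySem.List.sorted_perm mp (fun it => it.1) false
  have hperm : ((PySem.List.sorted mp (fun it => it.1)).flatMap pvEmit).Perm
      (mp.flatMap (pvRowsA mp)) := by
    refine (hsp.flatMap ?_)
    intro kv hkv
    exact pvEmit_perm mp hpre.1 kv (hsp.mem_iff.mp hkv)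
  have hndkeys : ((PySem.List.sorted mp (fun it => it.1)).map Prod.fst).Nodup :=
    (hsp.map Prod.fst).nodup_iff.mpr hpre.1
  have hlt : (PySem.List.sorted mp (fun it => it.1)).Pairwise (fun a b => a.1 < b.1) := by
    have hne : (PySem.List.sorted mp (fun it => it.1)).Pairwise (fun a b => a.1 ≠ b.1) :=
      List.pairwise_map.mp hndkeys
    exact ((PySem.List.sorted_pairwise mp (fun it => it.1)).and hne).imp
      (fun hab => lt_of_le_of_ne hab.1 hab.2)
  have hpw : ((PySem.List.sorted mp (fun it => it.1)).flatMap pvEmit).Pairwise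
      (fun a b => pvKey a ≤ pvKey b) := by
    refine List.pairwise_flatMap.mpr ⟨fun kv _ => pvEmit_pairwise kv, ?_⟩
    refine hlt.imp ?_
    intro kv kv' hkk x hx y hy
    have hxm := pvEmit_fst kv x hx
    have hym := pvEmit_fst kv' y hy
    exact pvKey_le_of_fst_lt x y (by rw [hxm, hym]; exact hkk)
  refine List.Perm.eq_of_pairwise ?_ ?_ hpw ?_
  · intro a b _ _ hab hba
    exact pvKey_injective (le_antisymm hab hba)
  · exact PySem.List.sorted_pairwise _ pvKey
  · exact (PySem.List.sorted_perm _ pvKey false).trans hperm.symm
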